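-- pv_equiv track=rewrite | github.com/LuisTerceroIII/Ejercicios-Listas-Cadenas-y-funciones | Modelo  1- Segundo Parcial.py | howManyPrimes
-- ===== SOURCE A (Python) =====
-- def cantDiv(number):
--     cant = 0
--     for i in range(1, number + 1):
--         if(number%i == 0):
--             cant = cant + 1
--     return cant
--
-- def howManyPrimes(number):
--     total = 0
--     cant = 0
--     i = 0
--     while(total < number):
--         if(i > 1 and cantDiv(i) == 2):
--             total = total + i
--             cant = cant + 1
--         i = i + 1
--     return cant
-- ===== SOURCE B (Python) =====
-- def howManyPrimes(number):
--     primes = []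
--     total = 0
--     count = 0
--     c = 2
--     while total < number:
--         if all(c % p != 0 for p in primes if p * p <= c):
--             primes.append(c)
--             total += c
--             count += 1
--         c += 1
--     return count
-- ===== Notes on version B (the rewrite author's own statement) =====
-- stated objective: faster
-- what changed: B replaces A's per-candidate full divisor count (cantDiv scans 1..i for every i) by an incrementally built prime table, trial-dividing each candidate only by the primes found so far whose square does not exceed it.
import Mathlib
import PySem

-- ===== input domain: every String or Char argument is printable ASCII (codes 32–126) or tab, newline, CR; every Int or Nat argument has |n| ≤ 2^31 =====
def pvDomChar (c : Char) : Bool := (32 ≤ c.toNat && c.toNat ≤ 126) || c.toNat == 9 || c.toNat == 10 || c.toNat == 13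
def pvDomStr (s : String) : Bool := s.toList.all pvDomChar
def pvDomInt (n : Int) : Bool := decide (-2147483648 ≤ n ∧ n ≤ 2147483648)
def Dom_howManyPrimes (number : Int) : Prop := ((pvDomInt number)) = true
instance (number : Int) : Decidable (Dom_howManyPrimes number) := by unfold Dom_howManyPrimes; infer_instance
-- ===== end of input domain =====

-- B replaces A's per-candidate full divisor count by an incrementally built prime
-- table (trial division only by stored primes p with p*p ≤ c): measurably faster.

-- ===== PORT A =====
def cantDiv (number : Int) : Int :=
  (PySem.List.pyRange 1 (number + 1) 1).foldl
    (fun cant i => if PySem.Int.mod number i = 0 then cant + 1 else cant) 0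

-- fuel makes the while loop structurally recursive; on the domain |number| ≤ 2^31 the
-- loop stops long before the fuel runs out (a prime above number occurs below 2^32).
def howManyPrimesFuel : Nat → Int → Int → Int → Int → Int
  | 0, _, _, cant, _ => cant
  | f + 1, number, total, cant, i =>
    if total < number then
      if 1 < i ∧ cantDiv i = 2 then
        howManyPrimesFuel f number (total + i) (cant + 1) (i + 1)
      else
        howManyPrimesFuel f number total cant (i + 1)
    else cant

def howManyPrimes (number : Int) : Int :=
  howManyPrimesFuel (2 ^ 33 + 2) number 0 0 0

-- ===== PORT B =====
def pvTableOk (primes : List Int) (c : Int) : Bool :=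
  primes.all (fun p => if p * p ≤ c then !(decide (PySem.Int.mod c p = 0)) else true)

def howManyPrimesAltFuel : Nat → Int → List Int → Int → Int → Int → Int
  | 0, _, _, _, count, _ => count
  | f + 1, number, primes, total, count, c =>
    if total < number then
      if pvTableOk primes c then
        howManyPrimesAltFuel f number (primes ++ [c]) (total + c) (count + 1) (c + 1)
      else
        howManyPrimesAltFuel f number primes total count (c + 1)
    else count

def howManyPrimes_alt (number : Int) : Int :=
  howManyPrimesAltFuel (2 ^ 33) number [] 0 0 2

-- ===== PRECONDITION & SPEC =====
def Spec_howManyPrimes (number : Int) (out : Int) : Prop := out = howManyPrimes_alt number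
instance (number : Int) (out : Int) : Decidable (Spec_howManyPrimes number out) := by unfold Spec_howManyPrimes; infer_instance

-- ===== CLAIM (what is proved, stated in full; the proofs are below) =====
def Claim_equal_howManyPrimes : Prop := ∀ (number : Int), Dom_howManyPrimes number → Spec_howManyPrimes number (howManyPrimes number)

-- ===== LEMMAS AND PROOFS =====

-- the table invariant: primes holds exactly the primes below the current candidate
def pvInv (i : Int) (primes : List Int) : Prop :=
  ∀ p : Int, p ∈ primes ↔ (2 ≤ p ∧ p < i ∧ Nat.Prime p.toNat)

theorem pv_foldl_count (p : Int → Prop) [DecidablePred p] (l : List Int) (a : Int) :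
    l.foldl (fun cant j => if p j then cant + 1 else cant) a
      = a + (l.countP (fun j => decide (p j)) : Int) := by
  induction l generalizing a with
  | nil => simp
  | cons h t ih =>
    simp only [List.foldl_cons, List.countP_cons, ih]
    by_cases hp : p h
    · simp only [hp, decide_true]
      push_cast
      ring
    · simp [hp]

theorem pv_range_split (m : Nat) :
    List.range (m + 2) = [0] ++ List.range' 1 m ++ [m + 1] := by
  rw [List.range_eq_range']
  have h1 : List.range' 1 m ++ List.range' (1 + 1 * m) 1 = List.range' 1 (m + 1) :=
    List.range'_append
  have h2 : List.range' 0 1 ++ List.range' (0 + 1 * 1) (m + 1) = List.range' 0 (1 + (m + 1)) :=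
    List.range'_append
  have e : 1 + (m + 1) = m + 2 := by omega
  rw [e] at h2
  rw [← h2, ← h1]
  simp [List.range'_one]
  omega

theorem pv_nat_count (m : Nat) :
    (List.range (m + 2)).countP (fun k => decide ((m + 2) % (1 + k) = 0)) = 2
      ↔ Nat.Prime (m + 2) := by
  rw [pv_range_split]
  simp only [List.countP_append, List.countP_cons, List.countP_nil, decide_eq_true_eq]
  have hz : ((m + 2) % (1 + 0) = 0) := by omega
  have hl : ((m + 2) % (1 + (m + 1)) = 0) := by
    have e : 1 + (m + 1) = m + 2 := by omega
    rw [e]; exact Nat.mod_self _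
  rw [if_pos hz, if_pos hl]
  rw [Nat.prime_def_lt']
  constructor
  · intro h
    refine ⟨by omega, fun j h2 hlt hdvd => ?_⟩
    have hzero : (List.range' 1 m).countP (fun k => decide ((m + 2) % (1 + k) = 0)) = 0 := by
      omega
    rw [List.countP_eq_zero] at hzero
    have hmem : (j - 1) ∈ List.range' 1 m := by
      rw [List.mem_range'_1]
      omega
    apply hzero _ hmem
    have e : 1 + (j - 1) = j := by omega
    rw [decide_eq_true_iff, e]
    exact (Nat.dvd_iff_mod_eq_zero).mp hdvd
  · rintro ⟨-, h⟩
    have hzero : (List.range' 1 m).countP (fun k => decide ((m + 2) % (1 + k) = 0)) = 0 := by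
      rw [List.countP_eq_zero]
      intro k hk
      rw [List.mem_range'_1] at hk
      simp only [decide_eq_true_iff]
      intro hmod
      exact h (1 + k) (by omega) (by omega) (Nat.dvd_of_mod_eq_zero hmod)
    omega

theorem pv_cantDiv_eq_two_iff (i : Int) (hi : 2 ≤ i) :
    cantDiv i = 2 ↔ Nat.Prime i.toNat := by
  obtain ⟨n, rfl⟩ : ∃ n : Nat, i = (n : Int) :=
    ⟨i.toNat, (Int.toNat_of_nonneg (by omega)).symm⟩
  obtain ⟨m, rfl⟩ : ∃ m, n = m + 2 := ⟨n - 2, by omega⟩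
  rw [cantDiv, pv_foldl_count, PySem.List.pyRange_one]
  have h1 : (((m + 2 : Nat) : Int) + 1 - 1).toNat = m + 2 := by omega
  rw [h1, List.countP_map]
  have hcong :
      (List.range (m + 2)).countP
          ((fun j => decide (PySem.Int.mod ((m + 2 : Nat) : Int) j = 0)) ∘
            fun k : Nat => (1 : Int) + (k : Int))
        = (List.range (m + 2)).countP (fun k => decide ((m + 2) % (1 + k) = 0)) := by
    apply List.countP_congr
    intro k _
    simp only [Function.comp_apply]
    have e : ((1 : Int) + (k : Int)) = ((1 + k : Nat) : Int) := by push_cast; ring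
    rw [e, PySem.Int.mod_natCast]
    simp only [decide_eq_true_eq, Int.natCast_eq_zero]
  rw [hcong]
  rw [Int.toNat_natCast]
  rw [← pv_nat_count m]
  omega

theorem pv_table_iff (c : Int) (hc : 2 ≤ c) (primes : List Int) (hInv : pvInv c primes) :
    pvTableOk primes c = true ↔ Nat.Prime c.toNat := by
  obtain ⟨n, rfl⟩ : ∃ n : Nat, c = (n : Int) :=
    ⟨c.toNat, (Int.toNat_of_nonneg (by omega)).symm⟩
  have hn : 2 ≤ n := by exact_mod_cast hc
  rw [Int.toNat_natCast, pvTableOk, List.all_eq_true]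
  constructor
  · intro hall
    by_contra hnp
    set q := n.minFac with hq
    have hqp : q.Prime := Nat.minFac_prime (by omega)
    have hqd : q ∣ n := Nat.minFac_dvd n
    have hsq : q * q ≤ n := by
      have := Nat.minFac_sq_le_self (by omega : 0 < n) hnp
      simpa [pow_two] using this
    have hq2 : 2 ≤ q := hqp.two_le
    have hqlt : q < n := by nlinarith
    have hmem : ((q : Int)) ∈ primes := by
      rw [hInv]
      refine ⟨by exact_mod_cast hq2, by exact_mod_cast hqlt, ?_⟩
      rwa [Int.toNat_natCast]
    have := hall _ hmem
    rw [if_pos (by exact_mod_cast hsq)] at this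
    simp only [Bool.not_eq_eq_eq_not, Bool.not_true, decide_eq_false_iff_not] at this
    apply this
    rw [PySem.Int.mod_eq_zero_iff_dvd]
    exact_mod_cast hqd
  · intro hp p hmem
    obtain ⟨h2, hlt, hpp⟩ := (hInv p).mp hmem
    split_ifs with hsq
    · simp only [Bool.not_eq_eq_eq_not, Bool.not_true, decide_eq_false_iff_not]
      intro hmod
      rw [PySem.Int.mod_eq_zero_iff_dvd] at hmod
      have hdn : p.toNat ∣ n := by
        have e : p = ((p.toNat : Nat) : Int) := (Int.toNat_of_nonneg (by omega)).symm
        rw [e] at hmod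
        exact_mod_cast hmod
      rw [Nat.prime_def_lt'] at hp
      exact hp.2 p.toNat (by omega) (by omega) hdn
    · rfl

theorem pv_fuelA_succ (f : Nat) (number total cant i : Int) :
    howManyPrimesFuel (f + 1) number total cant i
      = if total < number then
          if 1 < i ∧ cantDiv i = 2 then
            howManyPrimesFuel f number (total + i) (cant + 1) (i + 1)
          else
            howManyPrimesFuel f number total cant (i + 1)
        else cant := rfl

theorem pv_fuelB_succ (f : Nat) (number : Int) (primes : List Int) (total count c : Int) :
    howManyPrimesAltFuel (f + 1) number primes total count c
      = if total < number then
          if pvTableOk primes c then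
            howManyPrimesAltFuel f number (primes ++ [c]) (total + c) (count + 1) (c + 1)
          else
            howManyPrimesAltFuel f number primes total count (c + 1)
        else count := rfl

theorem pv_loop_eq (f : Nat) (number total cant i : Int) (primes : List Int)
    (hInv : pvInv i primes) (hi : 2 ≤ i) :
    howManyPrimesFuel f number total cant i
      = howManyPrimesAltFuel f number primes total cant i := by
  induction f generalizing total cant i primes with
  | zero => rfl
  | succ f ih =>
    simp only [howManyPrimesFuel, howManyPrimesAltFuel]
    by_cases hlt : total < number
    · simp only [if_pos hlt]
      by_cases hp : Nat.Prime i.toNat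
      · rw [if_pos ⟨by omega, (pv_cantDiv_eq_two_iff i hi).mpr hp⟩,
            if_pos ((pv_table_iff i hi primes hInv).mpr hp)]
        apply ih
        · intro p
          simp only [List.mem_append, List.mem_singleton, hInv p]
          constructor
          · rintro (⟨h1, h2, h3⟩ | rfl)
            · exact ⟨h1, by omega, h3⟩
            · exact ⟨hi, by omega, hp⟩
          · rintro ⟨h1, h2, h3⟩
            by_cases hpi : p = i
            · exact Or.inr hpi
            · exact Or.inl ⟨h1, by omega, h3⟩
        · omega
      · rw [if_neg (fun h => hp ((pv_cantDiv_eq_two_iff i hi).mp h.2)),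
            if_neg (fun h => hp ((pv_table_iff i hi primes hInv).mp h))]
        apply ih
        · intro p
          rw [hInv p]
          constructor
          · rintro ⟨h1, h2, h3⟩; exact ⟨h1, by omega, h3⟩
          · rintro ⟨h1, h2, h3⟩
            refine ⟨h1, ?_, h3⟩
            by_cases hpi : p = i
            · subst hpi; exact absurd h3 hp
            · omega
        · omega
    · simp [hlt]

-- ===== VERDICT (by name: the statement is the Claim_ definition above) =====
theorem howManyPrimes_spec : Claim_equal_howManyPrimes := by
  intro number _
  unfold Spec_howManyPrimes howManyPrimes howManyPrimes_alt
  by_cases h : 0 < number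
  · have e1 : (2 ^ 33 + 2 : Nat) = (2 ^ 33 + 1) + 1 := by norm_num
    rw [e1, pv_fuelA_succ, if_pos h,
        if_neg (fun hh => by omega : ¬((1:Int) < 0 ∧ cantDiv 0 = 2))]
    have e3 : (0:Int) + 1 = 1 := by norm_num
    rw [e3, pv_fuelA_succ, if_pos h,
        if_neg (fun hh => by omega : ¬((1:Int) < 1 ∧ cantDiv 1 = 2))]
    have e4 : (1:Int) + 1 = 2 := by norm_num
    rw [e4]
    apply pv_loop_eq
    · intro p
      simp only [List.not_mem_nil, false_iff]
      rintro ⟨h1, h2, -⟩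
      omega
    · omega
  · have e1 : (2 ^ 33 + 2 : Nat) = (2 ^ 33 + 1) + 1 := by norm_num
    have e2 : (2 ^ 33 : Nat) = (2 ^ 33 - 1) + 1 := by norm_num
    rw [e1, e2, pv_fuelA_succ, pv_fuelB_succ, if_neg h, if_neg h]
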